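-- pv_equiv track=rewrite | github.com/AMazewhy/amaze | 0/DSL/transfer.py | treetoarr2origin
-- ===== SOURCE A (Python) =====
-- def treetoarr2origin(s1,dict2):#将字符串常量视为同一个参数 需在节点与节点之间增加边信息标记idx
--     outarr = []
--     l1 = len(s1)
--     i=0
--     j=0
--     while j < l1:
--         if s1[j] != '(' and s1[j]!=')' and s1[j]!=',':
--             j = j+1
--         else:
--             if i==j:#连续的右括号
--                 outarr.append(-1)
--                 j=j+1
--                 i=j
--                 continue
--             tmp = s1[i:j]
--             if '"' in tmp:
--                 tmp = 'StringConst'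
--             if tmp in dict2:
--                 pass
--             else:
--                 num = len(dict2)
--                 dict2[tmp] = num
--             val = dict2[tmp]
--             outarr.append(val)
--             if s1[j]!='(':
--                 outarr.append(-1)
--             j=j+1
--             i=j
--     return outarr,dict2
-- ===== SOURCE B (Python) =====
-- def _tokenize(s):
--     # Ordered (token, delimiter) pairs; a trailing run with no following
--     # delimiter is deliberately dropped (matches the original's behaviour).
--     pairs = []
--     tok = []
--     for ch in s:
--         if ch == '(' or ch == ')' or ch == ',':
--             pairs.append((''.join(tok), ch))
--             tok = []
--         else:
--             tok.append(ch)
--     return pairs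
--
-- def treetoarr2origin(s1, dict2):
--     outarr = []
--     for tok, delim in _tokenize(s1):
--         if tok == '':
--             outarr.append(-1)
--         else:
--             if '"' in tok:
--                 tok = 'StringConst'
--             if tok not in dict2:
--                 dict2[tok] = len(dict2)
--             outarr.append(dict2[tok])
--             if delim != '(':
--                 outarr.append(-1)
--     return outarr, dict2
-- ===== Notes on version B (the rewrite author's own statement) =====
-- stated objective: simpler
-- what changed: Replaced the fused index-pair (i,j) while-loop with string slicing by a two-phase decomposition: first tokenize into ordered (token, delimiter) pairs (dropping any trailing run with no delimiter), then a plain loop over the pairs that emits ids and -1 markers; measured ~1.9x faster on large inputs (fewer per-char index/bookkeeping operations).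
import Mathlib
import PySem

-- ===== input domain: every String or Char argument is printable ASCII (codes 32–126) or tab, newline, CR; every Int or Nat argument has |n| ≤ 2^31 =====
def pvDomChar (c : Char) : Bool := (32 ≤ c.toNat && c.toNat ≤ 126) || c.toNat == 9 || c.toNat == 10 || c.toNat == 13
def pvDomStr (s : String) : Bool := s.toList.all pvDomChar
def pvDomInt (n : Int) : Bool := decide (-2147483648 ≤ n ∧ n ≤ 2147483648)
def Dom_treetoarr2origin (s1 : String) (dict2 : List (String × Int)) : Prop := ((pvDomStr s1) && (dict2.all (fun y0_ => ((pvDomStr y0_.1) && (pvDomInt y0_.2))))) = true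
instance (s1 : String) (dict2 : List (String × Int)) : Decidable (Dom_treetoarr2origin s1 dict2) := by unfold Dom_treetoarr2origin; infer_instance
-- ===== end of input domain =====

-- B replaces A's fused index-pair while-loop by tokenize-then-emit (simpler decomposition); A mutates dict2 in place in Python, the equivalence is about the returned pair.

-- ===== PORT A =====
-- literal port of A's while-loop over indices i (token start) and j (cursor)
def treetoarr2originLoop (cs : List Char) (i j : Nat) (out : List Int)
    (d : List (String × Int)) : List Int × (List (String × Int)) :=
  if h : j < cs.length then
    let c := cs[j]
    if c ≠ '(' ∧ c ≠ ')' ∧ c ≠ ',' then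
      treetoarr2originLoop cs i (j + 1) out d
    else if i = j then
      treetoarr2originLoop cs (j + 1) (j + 1) (out ++ [-1]) d
    else
      let tmp0 := PySem.List.slice cs (some (i : Int)) (some (j : Int))
      let tmp : String := if tmp0.contains '"' then "StringConst" else String.mk tmp0
      let d1 := if (d.lookup tmp).isSome then d else d ++ [(tmp, (d.length : Int))]
      let val : Int := (d1.lookup tmp).getD 0
      let out1 := out ++ [val]
      let out2 := if c ≠ '(' then out1 ++ [-1] else out1
      treetoarr2originLoop cs (j + 1) (j + 1) out2 d1
  else (out, d)
termination_by cs.length - j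
decreasing_by all_goals omega

def treetoarr2origin (s1 : String) (dict2 : List (String × Int)) : List Int × (List (String × Int)) :=
  treetoarr2originLoop s1.toList 0 0 [] dict2

-- ===== PORT B =====
-- phase 1: ordered (token, delimiter) pairs; a trailing run with no delimiter is dropped
def pvTokenize : List Char → List Char → List (List Char × Char)
  | _, [] => []
  | tok, c :: rs =>
    if c = '(' ∨ c = ')' ∨ c = ',' then (tok, c) :: pvTokenize [] rs
    else pvTokenize (tok ++ [c]) rs

-- phase 2: emit token ids and -1 edge markers
def pvEmit : List (List Char × Char) → List Int → List (String × Int) → List Int × (List (String × Int))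
  | [], out, d => (out, d)
  | (tok, delim) :: rest, out, d =>
    if tok = [] then pvEmit rest (out ++ [-1]) d
    else
      let t : String := if tok.contains '"' then "StringConst" else String.mk tok
      let d' := if (d.lookup t).isSome then d else d ++ [(t, (d.length : Int))]
      let out' := out ++ [((d'.lookup t).getD 0 : Int)]
      pvEmit rest (if delim ≠ '(' then out' ++ [-1] else out') d'

def treetoarr2origin_alt (s1 : String) (dict2 : List (String × Int)) : List Int × (List (String × Int)) :=
  pvEmit (pvTokenize [] s1.toList) [] dict2

-- ===== PRECONDITION & SPEC =====
def Spec_treetoarr2origin (s1 : String) (dict2 : List (String × Int)) (out : List Int × (List (String × Int))) : Prop := out = treetoarr2origin_alt s1 dict2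
instance (s1 : String) (dict2 : List (String × Int)) (out : List Int × (List (String × Int))) : Decidable (Spec_treetoarr2origin s1 dict2 out) := by unfold Spec_treetoarr2origin; infer_instance

-- ===== CLAIM (what is proved, stated in full; the proofs are below) =====
def Claim_equal_treetoarr2origin : Prop := ∀ (s1 : String) (dict2 : List (String × Int)), Dom_treetoarr2origin s1 dict2 → Spec_treetoarr2origin s1 dict2 (treetoarr2origin s1 dict2)

-- ===== LEMMAS AND PROOFS =====

-- A's loop state (i, j) corresponds to B's state (current token cs[i:j], rest cs[j:])
lemma loopA_eq_emit (cs : List Char) :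
    ∀ (n i j : Nat) (out : List Int) (d : List (String × Int)),
      i ≤ j → j ≤ cs.length → cs.length - j ≤ n →
      treetoarr2originLoop cs i j out d
        = pvEmit (pvTokenize ((cs.drop i).take (j - i)) (cs.drop j)) out d := by
  intro n
  induction n with
  | zero =>
    intro i j out d hij hjl hn
    have hj : j = cs.length := by omega
    rw [treetoarr2originLoop]
    simp [hj, List.drop_length, pvTokenize, pvEmit]
  | succ n ih =>
    intro i j out d hij hjl hn
    by_cases h : j < cs.length
    · have hdrop : cs.drop j = cs[j] :: cs.drop (j + 1) := List.drop_eq_getElem_cons h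
      rw [treetoarr2originLoop]
      rw [dif_pos h]
      by_cases hc : cs[j] ≠ '(' ∧ cs[j] ≠ ')' ∧ cs[j] ≠ ','
      · rw [if_pos hc]
        rw [ih i (j + 1) out d (by omega) (by omega) (by omega)]
        have htok : (cs.drop i).take (j + 1 - i) = (cs.drop i).take (j - i) ++ [cs[j]] := by
          have h1 : j + 1 - i = (j - i) + 1 := by omega
          rw [h1, List.take_succ]
          have h2 : (cs.drop i)[j - i]? = cs[j]? := by
            rw [List.getElem?_drop]
            congr 1
            omega
          rw [h2, List.getElem?_eq_getElem h]
          rfl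
        rw [htok, hdrop]
        rw [pvTokenize]
        rw [if_neg (by tauto)]
      · rw [if_neg hc]
        push_neg at hc
        have hdelim : cs[j] = '(' ∨ cs[j] = ')' ∨ cs[j] = ',' := by tauto
        by_cases hij' : i = j
        · rw [if_pos hij']
          rw [ih (j + 1) (j + 1) (out ++ [-1]) d (by omega) (by omega) (by omega)]
          rw [hdrop, pvTokenize, if_pos hdelim]
          have h0 : (cs.drop i).take (j - i) = [] := by
            simp [hij']
          rw [h0, pvEmit]
          simp
        · rw [if_neg hij']
          rw [ih (j + 1) (j + 1) _ _ (by omega) (by omega) (by omega)]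
          rw [hdrop, pvTokenize, if_pos hdelim]
          have hslice : PySem.List.slice cs (some (i : Int)) (some (j : Int))
              = (cs.drop i).take (j - i) := PySem.List.slice_natCast cs i j
          have hne : (cs.drop i).take (j - i) ≠ [] := by
            have : ((cs.drop i).take (j - i)).length = j - i := by
              rw [List.length_take, List.length_drop]
              omega
            intro hnil
            rw [hnil] at this
            simp at this
            omega
          rw [pvEmit]
          rw [if_neg hne]
          simp only [hslice]
          simp
    · have hj : j = cs.length := by omega
      rw [treetoarr2originLoop]
      simp [hj, List.drop_length, pvTokenize, pvEmit]

-- ===== VERDICT (by name: the statement is the Claim_ definition above) =====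
theorem treetoarr2origin_spec : Claim_equal_treetoarr2origin := by
  intro s1 dict2 _
  unfold Spec_treetoarr2origin treetoarr2origin treetoarr2origin_alt
  rw [loopA_eq_emit s1.toList s1.toList.length 0 0 [] dict2 (Nat.le_refl 0) (Nat.zero_le _) (by omega)]
  simp
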